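-- pv_equiv track=rewrite | github.com/tesselhuib/Valve_AI | embedding_classifier/aumc_data/split_dataset_with_labels.py | add_patients_to_split
-- ===== SOURCE A (Python) =====
-- def add_patients_to_split(target_ecg_count, patient_ids, patient_files):
--     """Assigns patients to a split while monitoring the number of ECGs.
--
--     Parameters
--     ----------
--     target_ecg_count : `int`
--         The number of ECGs wanted in the dataset.
--     patient_ids : `list` [`str`]
--         The list of patient IDs to consider for splitting.
--     patient_files : dict
--         A dictionary mapping patient IDs to their ECG files.
--
--     Returns
--     -------
--     current_ecg_count : `int`
--         Number of ECGs added to directory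
--     split_patients : `list` [`str`]
--         List of assigned patients.
--     """
--     current_ecg_count = 0
--     split_patients = []
--     while current_ecg_count < target_ecg_count and patient_ids:
--         patient_id = patient_ids.pop(0)
--         patient_ecg_count = len(patient_files[patient_id])
--         if current_ecg_count + patient_ecg_count <= target_ecg_count:
--             split_patients.append(patient_id)
--             current_ecg_count += patient_ecg_count
--         else:
--             split_patients.append(patient_id)
--             current_ecg_count += patient_ecg_count
--             break  # Stop adding more patients after this
--     return current_ecg_count, split_patients
-- ===== SOURCE B (Python) =====
-- def add_patients_to_split(target_ecg_count, patient_ids, patient_files):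
--     """B: two-phase re-implementation — first find the cut index with a lazy
--     cumulative scan, then take/delete the prefix in bulk (same in-place
--     consumption of patient_ids as A, without repeated pop(0))."""
--     k = 0
--     total = 0
--     n = len(patient_ids)
--     while k < n and total < target_ecg_count:
--         total += len(patient_files[patient_ids[k]])
--         k += 1
--     split_patients = patient_ids[:k]
--     del patient_ids[:k]
--     return total, split_patients
-- ===== Notes on version B (the rewrite author's own statement) =====
-- stated objective: alternative
-- what changed: Replaces the interleaved pop(0)/append loop (and its redundant break branch) by a two-phase algorithm: an index scan that finds the cut position with a running cumulative count, then one bulk slice/del of the prefix.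
import Mathlib
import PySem

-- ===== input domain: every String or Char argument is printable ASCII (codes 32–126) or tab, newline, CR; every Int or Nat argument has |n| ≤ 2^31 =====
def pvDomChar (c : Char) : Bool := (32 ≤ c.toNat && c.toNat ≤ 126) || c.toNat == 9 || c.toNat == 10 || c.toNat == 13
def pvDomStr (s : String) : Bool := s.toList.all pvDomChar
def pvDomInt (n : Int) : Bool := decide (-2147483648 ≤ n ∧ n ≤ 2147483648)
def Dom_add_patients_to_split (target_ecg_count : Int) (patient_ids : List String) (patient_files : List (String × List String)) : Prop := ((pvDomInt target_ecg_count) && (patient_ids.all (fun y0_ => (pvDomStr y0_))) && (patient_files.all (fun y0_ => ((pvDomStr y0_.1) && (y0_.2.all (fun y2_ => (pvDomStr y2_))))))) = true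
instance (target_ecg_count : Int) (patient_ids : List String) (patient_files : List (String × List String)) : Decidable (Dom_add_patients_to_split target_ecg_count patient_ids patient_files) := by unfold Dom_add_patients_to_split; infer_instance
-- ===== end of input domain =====

-- B replaces A's interleaved pop(0)/append loop by a cut-index scan plus one bulk
-- slice/del; equivalence is about the RETURN value — both Pythons also consume
-- patient_ids[:cut] in place identically on every input admitted by Pre_.

-- dict lookup (first match, per the association-list convention)
def pvLookup (files : List (String × List String)) (k : String) : Option (List String) :=
  (files.find? (fun p => p.1 == k)).map (·.2)

-- ===== PORT A =====
-- while-loop of A as structural recursion; `patient_files[patient_id]` would raise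
-- KeyError on a missing key (Pre_ excludes that), so the port reads `getD []` there.
def goA (target : Int) (files : List (String × List String)) :
    Int → List String → List String → Int × List String
  | cur, acc, ids =>
    if cur < target then
      match ids with
      | [] => (cur, acc)
      | id :: rest =>
        let c : Int := ((pvLookup files id).getD []).length
        if cur + c ≤ target then goA target files (cur + c) (acc ++ [id]) rest
        else (cur + c, acc ++ [id])
    else (cur, acc)

def add_patients_to_split (target_ecg_count : Int) (patient_ids : List String) (patient_files : List (String × List String)) : Int × List String :=
  goA target_ecg_count patient_files 0 [] patient_ids

-- ===== PORT B =====
-- Source B's index loop computing the cut index k and the running total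
def goB (target : Int) (ids : List String) (files : List (String × List String))
    (k : Nat) (total : Int) : Nat × Int :=
  if k < ids.length ∧ total < target then
    goB target ids files (k + 1) (total + (((pvLookup files (ids.getD k "")).getD []).length : Int))
  else (k, total)
termination_by ids.length - k
decreasing_by omega

def add_patients_to_split_alt (target_ecg_count : Int) (patient_ids : List String) (patient_files : List (String × List String)) : Int × List String :=
  let kt := goB target_ecg_count patient_ids patient_files 0 0
  (kt.2, patient_ids.take kt.1)

-- ===== PRECONDITION & SPEC =====
-- Pre_ excludes exactly the KeyError inputs: every patient reached while the running
-- count is still below the target must be a key of patient_files.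
def Pre_add_patients_to_split (target_ecg_count : Int) (patient_ids : List String) (patient_files : List (String × List String)) : Prop :=
  ∀ i ∈ List.range patient_ids.length,
    (((patient_ids.take i).map (fun id => (((pvLookup patient_files id).getD []).length : Int))).sum < target_ecg_count) →
    (pvLookup patient_files (patient_ids.getD i "")).isSome = true
instance (target_ecg_count : Int) (patient_ids : List String) (patient_files : List (String × List String)) : Decidable (Pre_add_patients_to_split target_ecg_count patient_ids patient_files) := by unfold Pre_add_patients_to_split; infer_instance

def pvWitness_add_patients_to_split : Int × List String × (List (String × List String)) :=
  (2, ["p1", "p2", "p3"], [("p1", ["a"]), ("p2", ["b", "c"])])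

def Spec_add_patients_to_split (target_ecg_count : Int) (patient_ids : List String) (patient_files : List (String × List String)) (out : Int × List String) : Prop := out = add_patients_to_split_alt target_ecg_count patient_ids patient_files
instance (target_ecg_count : Int) (patient_ids : List String) (patient_files : List (String × List String)) (out : Int × List String) : Decidable (Spec_add_patients_to_split target_ecg_count patient_ids patient_files out) := by unfold Spec_add_patients_to_split; infer_instance

-- ===== CLAIM (what is proved, stated in full; the proofs are below) =====
def Claim_equal_add_patients_to_split : Prop := ∀ (target_ecg_count : Int) (patient_ids : List String) (patient_files : List (String × List String)), Dom_add_patients_to_split target_ecg_count patient_ids patient_files → Pre_add_patients_to_split target_ecg_count patient_ids patient_files → Spec_add_patients_to_split target_ecg_count patient_ids patient_files (add_patients_to_split target_ecg_count patient_ids patient_files)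

-- ===== LEMMAS AND PROOFS =====

-- proof-side list-structural form of B's index scan
def scan (target : Int) (files : List (String × List String)) :
    List String → Int → Nat × Int
  | [], total => (0, total)
  | id :: rest, total =>
    if total < target then
      let mt := scan target files rest (total + (((pvLookup files id).getD []).length : Int))
      (mt.1 + 1, mt.2)
    else (0, total)

theorem scan_of_not_lt (target : Int) (files : List (String × List String))
    (l : List String) (total : Int) (h : ¬ total < target) :
    scan target files l total = (0, total) := by
  cases l with
  | nil => rfl
  | cons x xs => simp [scan, h]

theorem goB_eq_scan (target : Int) (files : List (String × List String))
    (ids : List String) : ∀ k total, k ≤ ids.length →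
    goB target ids files k total =
      ((scan target files (ids.drop k) total).1 + k, (scan target files (ids.drop k) total).2) := by
  intro k
  induction hn : ids.length - k generalizing k with
  | zero =>
    intro total hk
    have hk' : k = ids.length := by omega
    subst hk'
    rw [goB]
    simp [scan, List.drop_length]
  | succ n ih =>
    intro total hk
    have hklt : k < ids.length := by omega
    rw [goB]
    have hdrop : ids.drop k = ids[k] :: ids.drop (k + 1) :=
      List.drop_eq_getElem_cons hklt
    have hgetD : ids.getD k "" = ids[k] := List.getD_eq_getElem ids "" hklt
    by_cases htot : total < target
    · rw [if_pos ⟨hklt, htot⟩, ih (k + 1) (by omega) _ (by omega)]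
      rw [hdrop, hgetD]
      simp [scan, htot]
      omega
    · rw [if_neg (by tauto), hdrop, scan, if_neg htot]
      simp

theorem goA_eq_scan (target : Int) (files : List (String × List String)) :
    ∀ (ids : List String) (cur : Int) (acc : List String),
    goA target files cur acc ids =
      ((scan target files ids cur).2, acc ++ ids.take (scan target files ids cur).1) := by
  intro ids
  induction ids with
  | nil => intro cur acc; rw [goA]; simp [scan]
  | cons id rest ih =>
    intro cur acc
    rw [goA]
    by_cases hcur : cur < target
    · rw [if_pos hcur]
      simp only [scan, if_pos hcur]
      set c : Int := (((pvLookup files id).getD []).length : Int) with hc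
      by_cases hle : cur + c ≤ target
      · rw [if_pos hle, ih]
        simp
      · rw [if_neg hle]
        rw [scan_of_not_lt target files rest (cur + c) (by omega)]
        simp
    · rw [if_neg hcur]
      rw [scan_of_not_lt target files (id :: rest) cur hcur]
      simp

-- ===== VERDICT (by name: the statement is the Claim_ definition above) =====
theorem add_patients_to_split_spec : Claim_equal_add_patients_to_split := by
  intro target ids files _hdom _hpre
  unfold Spec_add_patients_to_split add_patients_to_split add_patients_to_split_alt
  rw [goA_eq_scan, goB_eq_scan target files ids 0 0 (by omega)]
  simp
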